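-- pv_equiv track=rewrite | github.com/RohitBCA456/python-for-cyber-security | PythonBasic/loops.py | sum_of_multiples_with_for
-- ===== SOURCE A (Python) =====
-- def sum_of_multiples_with_for(n):
--     sum = 0
--     for i in range(1, n+1):
--         if i % 3 == 0 and i % 5 == 0:
--             sum = sum + i**2
--         else:
--             continue
--     return sum
-- ===== SOURCE B (Python) =====
-- def sum_of_multiples_with_for(n):
--     m = n // 15 if n > 0 else 0
--     return 225 * m * (m + 1) * (2 * m + 1) // 6
-- ===== Notes on version B (the rewrite author's own statement) =====
-- stated objective: faster
-- what changed: Replaced the O(n) loop over range(1,n+1) by the closed-form Faulhaber formula 225*m*(m+1)*(2m+1)//6 with m = n//15.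
import Mathlib
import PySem

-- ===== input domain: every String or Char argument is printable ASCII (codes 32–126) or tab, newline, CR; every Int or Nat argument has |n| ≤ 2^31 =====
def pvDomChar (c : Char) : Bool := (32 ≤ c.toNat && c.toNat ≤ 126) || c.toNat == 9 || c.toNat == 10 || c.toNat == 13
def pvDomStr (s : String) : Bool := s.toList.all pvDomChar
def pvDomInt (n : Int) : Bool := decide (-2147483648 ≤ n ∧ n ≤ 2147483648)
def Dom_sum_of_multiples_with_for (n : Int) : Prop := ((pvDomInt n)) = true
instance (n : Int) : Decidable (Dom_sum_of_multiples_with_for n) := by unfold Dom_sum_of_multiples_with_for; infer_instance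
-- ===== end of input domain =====

-- B replaces A's O(n) loop by the closed-form 225*m*(m+1)*(2m+1)//6 with m = n//15 (faster).


-- ===== PORT A =====
def sum_of_multiples_with_for (n : Int) : Int :=
  (PySem.List.pyRange 1 (n + 1) 1).foldl
    (fun sum i => if PySem.Int.mod i 3 == 0 && PySem.Int.mod i 5 == 0 then sum + i ^ 2 else sum) 0

-- ===== PORT B =====
def sum_of_multiples_with_for_alt (n : Int) : Int :=
  let m : Int := if n > 0 then PySem.Int.floordiv n 15 else 0
  PySem.Int.floordiv (225 * m * (m + 1) * (2 * m + 1)) 6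

-- ===== PRECONDITION & SPEC =====
def Spec_sum_of_multiples_with_for (n : Int) (out : Int) : Prop := out = sum_of_multiples_with_for_alt n
instance (n : Int) (out : Int) : Decidable (Spec_sum_of_multiples_with_for n out) := by unfold Spec_sum_of_multiples_with_for; infer_instance

-- ===== CLAIM (what is proved, stated in full; the proofs are below) =====
def Claim_equal_sum_of_multiples_with_for : Prop := ∀ (n : Int), Dom_sum_of_multiples_with_for n → Spec_sum_of_multiples_with_for n (sum_of_multiples_with_for n)

-- ===== LEMMAS AND PROOFS =====

-- 6 × (A's loop up to k) equals 225·m(m+1)(2m+1) with m = k/15, by induction on k.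
theorem pv_six_mul_fold (k : Nat) :
    6 * sum_of_multiples_with_for (k : Int) =
      225 * ((k : Int) / 15) * (((k : Int) / 15) + 1) * (2 * ((k : Int) / 15) + 1) := by
  induction k with
  | zero =>
      simp [sum_of_multiples_with_for, PySem.List.pyRange_one_eq_nil]
  | succ k ih =>
      have hsplit : PySem.List.pyRange 1 ((k : Int) + 1 + 1) 1
          = PySem.List.pyRange 1 ((k : Int) + 1) 1 ++ [(k : Int) + 1] := by
        exact PySem.List.pyRange_one_succ_right (by omega)
      unfold sum_of_multiples_with_for at *
      push_cast
      rw [hsplit, List.foldl_append]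
      simp only [List.foldl_cons, List.foldl_nil]
      have hmod3 : PySem.Int.mod ((k : Int) + 1) 3 = ((k : Int) + 1) % 3 :=
        PySem.Int.mod_eq_emod_of_pos (by omega)
      have hmod5 : PySem.Int.mod ((k : Int) + 1) 5 = ((k : Int) + 1) % 5 :=
        PySem.Int.mod_eq_emod_of_pos (by omega)
      rw [hmod3, hmod5]
      by_cases h15 : ((k : Int) + 1) % 15 = 0
      · have h3 : ((k : Int) + 1) % 3 = 0 := by omega
        have h5 : ((k : Int) + 1) % 5 = 0 := by omega
        have hm : ((k : Int) + 1) / 15 = (k : Int) / 15 + 1 := by omega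
        have hk1 : (k : Int) + 1 = 15 * ((k : Int) / 15 + 1) := by omega
        simp only [h3, h5, beq_self_eq_true, Bool.and_self, if_true]
        rw [hm, mul_add, ih, hk1]
        ring
      · have h35 : ¬ (((k : Int) + 1) % 3 = 0 ∧ ((k : Int) + 1) % 5 = 0) := by omega
        have hm : ((k : Int) + 1) / 15 = (k : Int) / 15 := by omega
        have hcond : (((k : Int) + 1) % 3 == 0 && ((k : Int) + 1) % 5 == 0) = false := by
          rcases Decidable.em (((k : Int) + 1) % 3 = 0) with h3 | h3
          · have h5 : ¬ ((k : Int) + 1) % 5 = 0 := fun h5 => h35 ⟨h3, h5⟩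
            simp [h5]
          · simp [h3]
        rw [hcond, if_neg (by simp), hm, ih]

-- ===== VERDICT (by name: the statement is the Claim_ definition above) =====
theorem sum_of_multiples_with_for_spec : Claim_equal_sum_of_multiples_with_for := by
  intro n _
  unfold Spec_sum_of_multiples_with_for sum_of_multiples_with_for_alt
  by_cases hn : n > 0
  · have hk : ((n.toNat : Int)) = n := Int.toNat_of_nonneg (by omega)
    have h6 := pv_six_mul_fold n.toNat
    rw [hk] at h6
    rw [if_pos hn]
    rw [PySem.Int.floordiv_eq_ediv_of_pos (by norm_num),
        PySem.Int.floordiv_eq_ediv_of_pos (by norm_num : (0:Int) < 15)]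
    omega
  · have hnil : PySem.List.pyRange 1 (n + 1) 1 = [] :=
      PySem.List.pyRange_one_eq_nil (by omega)
    rw [if_neg hn]
    simp [sum_of_multiples_with_for, hnil, PySem.Int.floordiv]
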